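-- pv_equiv track=rewrite | github.com/charlieJ107/cmt120-assessment-1 | python/template.py | satisfiedWordleRule
-- ===== SOURCE A (Python) =====
-- def satisfiedWordleRule(word, green, yellow, gray):
--     for char_index in range(len(word)):
--         for y in yellow.keys():
--             # Yellow rule
--             if y not in word:
--                 return False
--         if word[char_index] in yellow.keys():
--             for yellow_num in yellow[word[char_index]]:
--                 if char_index == yellow_num:
--                     return False
--         # Gray rule
--         if word[char_index] in gray:
--             return False
--         # Green rule
--         if char_index in green.keys() and word[char_index] != green[char_index]:
--             return False
--     return True
-- ===== SOURCE B (Python) =====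
-- def satisfiedWordleRule(word, green, yellow, gray):
--     n = len(word)
--     # Yellow presence: every required letter must occur somewhere in the word.
--     for y in yellow:
--         if y not in word:
--             return False
--     # Gray: no gray letter may occur anywhere in the word.
--     for g in gray:
--         if g in word:
--             return False
--     # Yellow positions: a yellow letter must not sit at one of its excluded indices.
--     for ch, idxs in yellow.items():
--         for i in idxs:
--             if 0 <= i < n and word[i] == ch:
--                 return False
--     # Green: a green slot must hold exactly its letter.
--     for i, ch in green.items():
--         if 0 <= i < n and word[i] != ch:
--             return False
--     return True
-- ===== Notes on version B (the rewrite author's own statement) =====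
-- stated objective: alternative
-- what changed: A fuses everything into one per-index loop over the word (re-checking every yellow key's presence at each index); B iterates over the constraints instead: a yellow-presence pass over the keys, a gray pass over the gray letters, a pass over yellow items' index lists, and a pass over green items, never re-scanning per word index.
-- intended difference: On an empty word with a nonempty required yellow letter, A returns True (all its checks live inside the skipped per-index loop) while B returns False, the intended value since a required letter cannot occur in an empty word. — e.g. on satisfiedWordleRule("", [], [("a", [0])], ""): A returns true, B returns false
import Mathlib
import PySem

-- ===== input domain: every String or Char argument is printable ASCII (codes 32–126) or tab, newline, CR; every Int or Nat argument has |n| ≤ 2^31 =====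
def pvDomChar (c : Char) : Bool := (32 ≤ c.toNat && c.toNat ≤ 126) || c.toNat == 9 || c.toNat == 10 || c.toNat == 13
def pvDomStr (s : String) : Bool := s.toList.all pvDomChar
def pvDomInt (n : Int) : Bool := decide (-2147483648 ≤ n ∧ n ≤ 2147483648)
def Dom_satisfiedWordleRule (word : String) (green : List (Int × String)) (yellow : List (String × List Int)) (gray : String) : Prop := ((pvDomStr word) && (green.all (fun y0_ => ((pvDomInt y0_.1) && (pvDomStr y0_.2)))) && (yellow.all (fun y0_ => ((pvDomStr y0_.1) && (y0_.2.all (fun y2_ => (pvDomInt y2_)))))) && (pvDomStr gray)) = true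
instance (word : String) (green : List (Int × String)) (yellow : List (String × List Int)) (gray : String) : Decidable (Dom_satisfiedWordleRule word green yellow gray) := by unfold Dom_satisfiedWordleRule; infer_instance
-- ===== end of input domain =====

-- B iterates over the constraints (yellow keys, gray letters, yellow items, green items) instead of
-- A's fused per-index loop over the word; B also fixes A's empty-word corner, see D_ below.

-- ===== PORT A =====
-- the fused loop: at every index, first re-check all yellow keys for presence, then the
-- yellow-position / gray / green rules for this index; early `return False` = stop with false
def satisfiedWordleRuleGo (wl : List Char) (green : List (Int × String))
    (yellow : List (String × List Int)) (gray : String) : List (Int × Char) → Bool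
  | [] => true
  | (i, c) :: rest =>
    if (yellow.map (·.1)).any (fun y => !(PySem.Chars.isIn y.toList wl)) then false
    else if (yellow.map (·.1)).contains (String.ofList [c]) &&
            ((PySem.Dict.mk yellow).getD (String.ofList [c]) []).any (fun m => i == m) then false
    else if PySem.Chars.isIn [c] gray.toList then false
    else if (green.map (·.1)).contains i && !(String.ofList [c] == (PySem.Dict.mk green).getD i "") then false
    else satisfiedWordleRuleGo wl green yellow gray rest

def satisfiedWordleRule (word : String) (green : List (Int × String)) (yellow : List (String × List Int)) (gray : String) : Bool :=
  satisfiedWordleRuleGo word.toList green yellow gray (PySem.List.enumerate word.toList 0)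

-- ===== PORT B =====
-- four sequential passes over the constraints, one `if` per pass like Source B's four loops
def satisfiedWordleRule_alt (word : String) (green : List (Int × String)) (yellow : List (String × List Int)) (gray : String) : Bool :=
  if yellow.any (fun p => !(PySem.Chars.isIn p.1.toList word.toList)) then false
  else if gray.toList.any (fun g => PySem.Chars.isIn [g] word.toList) then false
  else if yellow.any (fun p => p.2.any (fun i =>
         decide (0 ≤ i) && decide (i < (word.toList.length : Int)) &&
         ((PySem.List.pyGet? word.toList i).any (fun c => String.ofList [c] == p.1)))) then false
  else if green.any (fun p =>
         decide (0 ≤ p.1) && decide (p.1 < (word.toList.length : Int)) &&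
         ((PySem.List.pyGet? word.toList p.1).any (fun c => !(String.ofList [c] == p.2)))) then false
  else true

-- ===== PRECONDITION & SPEC =====
-- Pre_ excludes association lists with duplicate green/yellow keys: a Python dict cannot carry
-- duplicate keys, so those lists represent no real input of A (first- vs later-match is accidental).
def Pre_satisfiedWordleRule (word : String) (green : List (Int × String)) (yellow : List (String × List Int)) (gray : String) : Prop :=
  (green.map (·.1)).Nodup ∧ (yellow.map (·.1)).Nodup
instance (word : String) (green : List (Int × String)) (yellow : List (String × List Int)) (gray : String) : Decidable (Pre_satisfiedWordleRule word green yellow gray) := by unfold Pre_satisfiedWordleRule; infer_instance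

def pvWitness_satisfiedWordleRule : String × (List (Int × String)) × (List (String × List Int)) × String :=
  ("ab", [((0:Int), "a")], [("b", [(0:Int)])], "z")

-- On an empty word with a nonempty yellow letter required, A returns True (its checks live inside
-- the skipped per-index loop) while B returns False, the intended value: a required letter cannot
-- occur in the empty word.
def D_satisfiedWordleRule (word : String) (green : List (Int × String)) (yellow : List (String × List Int)) (gray : String) : Prop :=
  word.toList = [] ∧ ∃ p ∈ yellow, p.1 ≠ ""
instance (word : String) (green : List (Int × String)) (yellow : List (String × List Int)) (gray : String) : Decidable (D_satisfiedWordleRule word green yellow gray) := by unfold D_satisfiedWordleRule; infer_instance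

def Spec_satisfiedWordleRule (word : String) (green : List (Int × String)) (yellow : List (String × List Int)) (gray : String) (out : Bool) : Prop := ¬ D_satisfiedWordleRule word green yellow gray → out = satisfiedWordleRule_alt word green yellow gray
instance (word : String) (green : List (Int × String)) (yellow : List (String × List Int)) (gray : String) (out : Bool) : Decidable (Spec_satisfiedWordleRule word green yellow gray out) := by unfold Spec_satisfiedWordleRule; infer_instance

def pvDiffWitness_satisfiedWordleRule : String × (List (Int × String)) × (List (String × List Int)) × String :=
  ("", [], [("a", [0])], "")
def pvDiffWitnessOut_satisfiedWordleRule : Bool × Bool := (true, false)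

-- ===== CLAIM =====
def Claim_unchanged_satisfiedWordleRule : Prop := ∀ (word : String) (green : List (Int × String)) (yellow : List (String × List Int)) (gray : String), Dom_satisfiedWordleRule word green yellow gray → Pre_satisfiedWordleRule word green yellow gray → Spec_satisfiedWordleRule word green yellow gray (satisfiedWordleRule word green yellow gray)
def Claim_changed_satisfiedWordleRule : Prop := Dom_satisfiedWordleRule (pvDiffWitness_satisfiedWordleRule.1) (pvDiffWitness_satisfiedWordleRule.2.1) (pvDiffWitness_satisfiedWordleRule.2.2.1) (pvDiffWitness_satisfiedWordleRule.2.2.2) ∧ Pre_satisfiedWordleRule (pvDiffWitness_satisfiedWordleRule.1) (pvDiffWitness_satisfiedWordleRule.2.1) (pvDiffWitness_satisfiedWordleRule.2.2.1) (pvDiffWitness_satisfiedWordleRule.2.2.2) ∧ D_satisfiedWordleRule (pvDiffWitness_satisfiedWordleRule.1) (pvDiffWitness_satisfiedWordleRule.2.1) (pvDiffWitness_satisfiedWordleRule.2.2.1) (pvDiffWitness_satisfiedWordleRule.2.2.2) ∧ satisfiedWordleRule (pvDiffWitness_satisfiedWordleRule.1) (pvDiffWitness_satisfiedWordleRule.2.1)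 (pvDiffWitness_satisfiedWordleRule.2.2.1) (pvDiffWitness_satisfiedWordleRule.2.2.2) = pvDiffWitnessOut_satisfiedWordleRule.1 ∧ satisfiedWordleRule_alt (pvDiffWitness_satisfiedWordleRule.1) (pvDiffWitness_satisfiedWordleRule.2.1) (pvDiffWitness_satisfiedWordleRule.2.2.1) (pvDiffWitness_satisfiedWordleRule.2.2.2) = pvDiffWitnessOut_satisfiedWordleRule.2 ∧ pvDiffWitnessOut_satisfiedWordleRule.1 ≠ pvDiffWitnessOut_satisfiedWordleRule.2
def Claim_exact_satisfiedWordleRule : Prop := ∀ (word : String) (green : List (Int × String)) (yellow : List (String × List Int)) (gray : String), Dom_satisfiedWordleRule word green yellow gray → Pre_satisfiedWordleRule word green yellow gray → D_satisfiedWordleRule word green yellow gray → satisfiedWordleRule word green yellow gray ≠ satisfiedWordleRule_alt word green yellow gray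

-- ===== LEMMAS AND PROOFS =====

-- A's three per-index rule checks, named for the proofs
def hitYellow (yellow : List (String × List Int)) (i : Int) (c : Char) : Bool :=
  (yellow.map (·.1)).contains (String.ofList [c]) &&
    ((PySem.Dict.mk yellow).getD (String.ofList [c]) []).any (fun m => i == m)

def hitGray (gray : String) (c : Char) : Bool := PySem.Chars.isIn [c] gray.toList

def hitGreen (green : List (Int × String)) (i : Int) (c : Char) : Bool :=
  (green.map (·.1)).contains i && !(String.ofList [c] == (PySem.Dict.mk green).getD i "")

-- when every yellow key occurs in the word, A's fused loop is the conjunction of the per-index rules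
theorem go_eq_all (green : List (Int × String)) (yellow : List (String × List Int)) (gray : String)
    (wl : List Char) (l : List (Int × Char))
    (h : (yellow.map (·.1)).any (fun y => !(PySem.Chars.isIn y.toList wl)) = false) :
    satisfiedWordleRuleGo wl green yellow gray l
      = l.all (fun ic => !(hitYellow yellow ic.1 ic.2 || hitGray gray ic.2 || hitGreen green ic.1 ic.2)) := by
  induction l with
  | nil => rfl
  | cons ic rest ih =>
    obtain ⟨i, c⟩ := ic
    rw [satisfiedWordleRuleGo, h, List.all_cons, ← ih]
    simp only [hitYellow, hitGray, hitGreen]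
    cases hb1 : ((yellow.map (·.1)).contains (String.ofList [c]) &&
        ((PySem.Dict.mk yellow).getD (String.ofList [c]) []).any (fun m => i == m)) <;>
      cases hb2 : PySem.Chars.isIn [c] gray.toList <;>
      cases hb3 : ((green.map (·.1)).contains i &&
        !(String.ofList [c] == (PySem.Dict.mk green).getD i "")) <;>
      simp

theorem any_or₃ {α : Type} (l : List α) (f g h : α → Bool) :
    l.any (fun x => f x || g x || h x) = (l.any f || l.any g || l.any h) := by
  induction l with
  | nil => rfl
  | cons x xs ih =>
    simp only [List.any_cons, ih]
    cases f x <;> cases g x <;> cases h x <;> simp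

-- A's per-index gray check, summed over the word, equals B's pass over the gray letters
theorem gray_any_eq (wl : List Char) (gray : String) :
    (PySem.List.enumerate wl 0).any (fun ic => hitGray gray ic.2)
      = gray.toList.any (fun g => PySem.Chars.isIn [g] wl) := by
  rw [Bool.eq_iff_iff]
  simp only [List.any_eq_true, hitGray, PySem.Chars.isIn_iff_infix, List.singleton_infix_iff,
    PySem.List.mem_enumerate_iff]
  constructor
  · rintro ⟨⟨i, c⟩, ⟨k, hk, heq⟩, hmem⟩
    injection heq with h1 h2
    subst h1; subst h2
    exact ⟨wl[k], hmem, List.getElem_mem hk⟩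
  · rintro ⟨g, hg, hgw⟩
    obtain ⟨k, hk, rfl⟩ := List.mem_iff_getElem.mp hgw
    exact ⟨((0 : Int) + k, wl[k]), ⟨k, hk, rfl⟩, hg⟩

-- A's per-index yellow-position check equals B's pass over the yellow items
theorem yellow_any_eq (wl : List Char) (yellow : List (String × List Int))
    (hy : (yellow.map (·.1)).Nodup) :
    (PySem.List.enumerate wl 0).any (fun ic => hitYellow yellow ic.1 ic.2)
      = yellow.any (fun p => p.2.any (fun i =>
          decide (0 ≤ i) && decide (i < (wl.length : Int)) &&
          ((PySem.List.pyGet? wl i).any (fun c => String.ofList [c] == p.1)))) := by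
  have hkeys : (PySem.Dict.mk yellow).keys.Nodup := by simpa using hy
  rw [Bool.eq_iff_iff]
  constructor
  · intro h
    rw [List.any_eq_true] at h
    obtain ⟨⟨i, c⟩, hmemE, hIC⟩ := h
    rw [PySem.List.mem_enumerate_iff] at hmemE
    obtain ⟨k, hk, heq⟩ := hmemE
    injection heq with h1 h2
    subst h1; subst h2
    simp only [hitYellow, Bool.and_eq_true] at hIC
    obtain ⟨hkey, hidx⟩ := hIC
    rw [List.contains_iff_mem, List.mem_map] at hkey
    obtain ⟨⟨pk, pv⟩, hp, hpk⟩ := hkey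
    simp only at hpk
    subst hpk
    have hgd : (PySem.Dict.mk yellow).getD (String.ofList [wl[k]]) [] = pv :=
      PySem.Dict.getD_of_mem_items (PySem.Dict.mk yellow) hp hkeys []
    rw [hgd, List.any_eq_true] at hidx
    obtain ⟨m, hm, him⟩ := hidx
    rw [beq_iff_eq] at him
    have hm0 : m = (k : Int) := by omega
    subst hm0
    rw [List.any_eq_true]
    refine ⟨(String.ofList [wl[k]], pv), hp, ?_⟩
    rw [List.any_eq_true]
    refine ⟨(k : Int), hm, ?_⟩
    have hsome : PySem.List.pyGet? wl (k : Int) = some wl[k] := by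
      rw [PySem.List.pyGet?_natCast]; simp [hk]
    have c1 : decide (0 ≤ (k : Int)) = true := by simp
    have c2 : decide ((k : Int) < (wl.length : Int)) = true := by simp [hk]
    rw [c1, c2, hsome]
    simp
  · intro h
    rw [List.any_eq_true] at h
    obtain ⟨⟨pk, pv⟩, hp, hpl⟩ := h
    rw [List.any_eq_true] at hpl
    obtain ⟨i, hi, hcond⟩ := hpl
    simp only [Bool.and_eq_true, decide_eq_true_eq] at hcond
    obtain ⟨⟨h0, hn⟩, hget⟩ := hcond
    obtain ⟨k, rfl⟩ : ∃ k : Nat, i = (k : Int) := ⟨i.toNat, by omega⟩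
    have hk : k < wl.length := by exact_mod_cast hn
    have hsome : PySem.List.pyGet? wl (k : Int) = some wl[k] := by
      rw [PySem.List.pyGet?_natCast]; simp [hk]
    rw [hsome] at hget
    simp only [Option.any_some, beq_iff_eq] at hget
    subst hget
    rw [List.any_eq_true]
    refine ⟨((0 : Int) + k, wl[k]), ?_, ?_⟩
    · rw [PySem.List.mem_enumerate_iff]; exact ⟨k, hk, rfl⟩
    · simp only [hitYellow, Bool.and_eq_true]
      constructor
      · rw [List.contains_iff_mem, List.mem_map]
        exact ⟨(String.ofList [wl[k]], pv), hp, rfl⟩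
      · have hgd : (PySem.Dict.mk yellow).getD (String.ofList [wl[k]]) [] = pv :=
          PySem.Dict.getD_of_mem_items (PySem.Dict.mk yellow) hp hkeys []
        rw [hgd, List.any_eq_true]
        exact ⟨(k : Int), hi, by rw [beq_iff_eq]; omega⟩

-- A's per-index green check equals B's pass over the green items
theorem green_any_eq (wl : List Char) (green : List (Int × String))
    (hg : (green.map (·.1)).Nodup) :
    (PySem.List.enumerate wl 0).any (fun ic => hitGreen green ic.1 ic.2)
      = green.any (fun p =>
          decide (0 ≤ p.1) && decide (p.1 < (wl.length : Int)) &&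
          ((PySem.List.pyGet? wl p.1).any (fun c => !(String.ofList [c] == p.2)))) := by
  have hkeys : (PySem.Dict.mk green).keys.Nodup := by simpa using hg
  rw [Bool.eq_iff_iff]
  constructor
  · intro h
    rw [List.any_eq_true] at h
    obtain ⟨⟨i, c⟩, hmemE, hIC⟩ := h
    rw [PySem.List.mem_enumerate_iff] at hmemE
    obtain ⟨k, hk, heq⟩ := hmemE
    injection heq with h1 h2
    subst h1; subst h2
    simp only [hitGreen, Bool.and_eq_true] at hIC
    obtain ⟨hkey, hne⟩ := hIC
    rw [List.contains_iff_mem, List.mem_map] at hkey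
    obtain ⟨⟨pk, pv⟩, hp, hpk⟩ := hkey
    simp only at hpk
    subst hpk
    have hgd : (PySem.Dict.mk green).getD ((0 : Int) + (k : Int)) "" = pv :=
      PySem.Dict.getD_of_mem_items (PySem.Dict.mk green) hp hkeys ""
    rw [hgd] at hne
    rw [List.any_eq_true]
    refine ⟨((0 : Int) + (k : Int), pv), hp, ?_⟩
    simp only
    have hsome : PySem.List.pyGet? wl ((0 : Int) + (k : Int)) = some wl[k] := by
      have h0 : (0 : Int) + (k : Int) = (k : Int) := by omega
      rw [h0, PySem.List.pyGet?_natCast]; simp [hk]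
    have c1 : decide (0 ≤ (0 : Int) + (k : Int)) = true := by simp
    have c2 : decide ((0 : Int) + (k : Int) < (wl.length : Int)) = true := by
      rw [decide_eq_true_eq]; omega
    rw [c1, c2, hsome]
    simpa using hne
  · intro h
    rw [List.any_eq_true] at h
    obtain ⟨⟨pk, pv⟩, hp, hcond⟩ := h
    simp only [Bool.and_eq_true, decide_eq_true_eq] at hcond
    obtain ⟨⟨h0, hn⟩, hget⟩ := hcond
    obtain ⟨k, hpk⟩ : ∃ k : Nat, pk = (k : Int) := ⟨pk.toNat, by omega⟩
    subst hpk
    have hk : k < wl.length := by exact_mod_cast hn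
    have hsome : PySem.List.pyGet? wl (k : Int) = some wl[k] := by
      rw [PySem.List.pyGet?_natCast]; simp [hk]
    rw [hsome] at hget
    simp only [Option.any_some] at hget
    rw [List.any_eq_true]
    refine ⟨((0 : Int) + k, wl[k]), ?_, ?_⟩
    · rw [PySem.List.mem_enumerate_iff]; exact ⟨k, hk, rfl⟩
    · simp only [hitGreen, Bool.and_eq_true]
      have hi : (0 : Int) + (k : Int) = (k : Int) := by omega
      constructor
      · rw [List.contains_iff_mem, List.mem_map]
        exact ⟨((k : Int), pv), hp, by simp [hi]⟩
      · have hgd : (PySem.Dict.mk green).getD ((0 : Int) + (k : Int)) "" = pv := by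
          rw [hi]
          exact PySem.Dict.getD_of_mem_items (PySem.Dict.mk green) hp hkeys ""
        rw [hgd]
        exact hget

theorem isIn_nil_iff (sub : List Char) :
    PySem.Chars.isIn sub ([] : List Char) = true ↔ sub = [] := by
  rw [PySem.Chars.isIn_iff_infix]
  constructor
  · intro h; exact List.eq_nil_of_infix_nil h
  · rintro rfl; simp [PySem.Chars.isIn_nil]

-- ===== VERDICT =====
theorem satisfiedWordleRule_spec : Claim_unchanged_satisfiedWordleRule := by
  intro word green yellow gray _ hpre hnd
  obtain ⟨hgkeys, hykeys⟩ := hpre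
  unfold satisfiedWordleRule satisfiedWordleRule_alt
  by_cases hmiss : yellow.any (fun p => !(PySem.Chars.isIn p.1.toList word.toList)) = true
  · rw [if_pos hmiss]
    rcases hw : word.toList with _ | ⟨c, rest⟩
    · exfalso
      simp only [List.any_eq_true, Bool.not_eq_eq_eq_not, Bool.not_true] at hmiss
      obtain ⟨p, hp, hnotin⟩ := hmiss
      rw [hw] at hnotin
      rcases eq_or_ne p.1 "" with he | he
      · rw [he] at hnotin
        simp at hnotin
      · exact hnd ⟨hw, p, hp, he⟩
    · have hm2 : (yellow.map (·.1)).any (fun y => !(PySem.Chars.isIn y.toList (c :: rest))) = true := by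
        rw [List.any_map, ← hw]; exact hmiss
      simp only [PySem.List.enumerate_cons]
      rw [satisfiedWordleRuleGo, hm2]
      simp
  · rw [Bool.not_eq_true] at hmiss
    rw [if_neg (by simp [hmiss])]
    have hm2 : (yellow.map (·.1)).any (fun y => !(PySem.Chars.isIn y.toList word.toList)) = false := by
      rw [List.any_map]; exact hmiss
    rw [go_eq_all green yellow gray word.toList _ hm2]
    rw [show (PySem.List.enumerate word.toList 0).all
          (fun ic => !(hitYellow yellow ic.1 ic.2 || hitGray gray ic.2 || hitGreen green ic.1 ic.2))
        = !((PySem.List.enumerate word.toList 0).any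
          (fun ic => hitYellow yellow ic.1 ic.2 || hitGray gray ic.2 || hitGreen green ic.1 ic.2)) by
      rw [List.all_eq_not_any_not]; simp]
    rw [any_or₃, yellow_any_eq word.toList yellow hykeys, gray_any_eq word.toList gray,
      green_any_eq word.toList green hgkeys]
    cases h2 : gray.toList.any (fun g => PySem.Chars.isIn [g] word.toList) <;>
    cases h3 : yellow.any (fun p => p.2.any (fun i =>
        decide (0 ≤ i) && decide (i < (word.toList.length : Int)) &&
        ((PySem.List.pyGet? word.toList i).any (fun c => String.ofList [c] == p.1)))) <;>
    cases h4 : green.any (fun p =>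
        decide (0 ≤ p.1) && decide (p.1 < (word.toList.length : Int)) &&
        ((PySem.List.pyGet? word.toList p.1).any (fun c => !(String.ofList [c] == p.2)))) <;>
    simp

theorem satisfiedWordleRule_changed : Claim_changed_satisfiedWordleRule := by
  unfold Claim_changed_satisfiedWordleRule; decide

theorem satisfiedWordleRule_tight : Claim_exact_satisfiedWordleRule := by
  intro word green yellow gray _ _ hd
  obtain ⟨hw, p, hp, hne⟩ := hd
  have hA : satisfiedWordleRule word green yellow gray = true := by
    unfold satisfiedWordleRule
    rw [hw, PySem.List.enumerate_nil]
    rfl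
  have hB : satisfiedWordleRule_alt word green yellow gray = false := by
    unfold satisfiedWordleRule_alt
    rw [if_pos ?_]
    simp only [List.any_eq_true]
    refine ⟨p, hp, ?_⟩
    rw [hw]
    simp only [Bool.not_eq_eq_eq_not, Bool.not_true, ← Bool.not_eq_true, isIn_nil_iff]
    intro hnil
    exact hne (String.ext (by simpa [String.toList] using hnil))
  rw [hA, hB]; simp
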